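-- pv_equiv track=rewrite | github.com/pypi-data/pypi-mirror-391 | packages/cornserve/cornserve-0.1.0.tar.gz/cornserve-0.1.0/cornserve/cli/tasklib_explorer.py | _sanitize_k8s_name
-- ===== SOURCE A (Python) =====
-- def _sanitize_k8s_name(raw: str) -> str:
--     """Sanitize an string into a valid K8s metadata.name.
--
--     - Only lowercase alphanumerics, '-' or '.'
--     - Start and end with an alphanumeric
--     - Other characters converted to '-'
--     """
--     sanitized: list[str] = []
--     for ch in raw.lower():
--         if ("a" <= ch <= "z") or ("0" <= ch <= "9") or ch in {"-", "."}:
--             sanitized.append(ch)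
--         else:
--             sanitized.append("-")
--     name = "".join(sanitized)
--     while "--" in name:
--         name = name.replace("--", "-")
--     name = name.strip("-.")
--     return name
-- ===== SOURCE B (Python) =====
-- def _sanitize_k8s_name(raw: str) -> str:
--     out: list[str] = []
--     for ch in raw.lower():
--         c = ch if ("a" <= ch <= "z") or ("0" <= ch <= "9") or ch in "-." else "-"
--         if c == "-" and out and out[-1] == "-":
--             continue
--         out.append(c)
--     return "".join(out).strip("-.")
-- ===== Notes on version B (the rewrite author's own statement) =====
-- stated objective: alternative
-- what changed: A maps characters into a list and then repeatedly rescans the whole string, replacing double dashes until none remain, before stripping; B collapses dash runs in the same single left-to-right pass that does the character mapping (a dash is skipped when the last emitted character is a dash), then strips once.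
import Mathlib
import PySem

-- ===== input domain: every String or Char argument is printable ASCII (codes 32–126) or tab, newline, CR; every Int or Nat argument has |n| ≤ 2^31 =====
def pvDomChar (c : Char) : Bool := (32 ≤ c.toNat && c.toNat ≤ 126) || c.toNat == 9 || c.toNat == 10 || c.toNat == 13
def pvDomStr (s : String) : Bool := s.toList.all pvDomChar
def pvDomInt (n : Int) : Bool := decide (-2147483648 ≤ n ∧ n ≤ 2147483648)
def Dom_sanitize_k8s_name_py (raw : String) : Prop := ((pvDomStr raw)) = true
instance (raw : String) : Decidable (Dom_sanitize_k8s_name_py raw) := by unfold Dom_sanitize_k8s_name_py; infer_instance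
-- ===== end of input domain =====

-- B replaces A's repeated whole-string replace-until-fixpoint rescanning by a single left-to-right
-- pass that never emits a '-' directly after a '-'; return values are proved equal (no side effects involved).

-- ===== PORT A =====
-- One left-to-right non-overlapping pass of name.replace("--", "-"); used to prove the
-- termination of A's `while "--" in name` loop (the replace strictly shortens the string).
def pvRep : List Char → List Char
  | [] => []
  | [c] => [c]
  | a :: b :: t => if a = '-' ∧ b = '-' then '-' :: pvRep t else a :: pvRep (b :: t)

theorem pvRep_go (fuel : Nat) : ∀ (l acc : List Char), l.length ≤ fuel →
    PySem.Chars.replace.go ['-', '-'] ['-'] fuel l acc = acc.reverse ++ pvRep l := by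
  induction fuel with
  | zero =>
    intro l acc h
    have : l = [] := by cases l <;> simp_all
    subst this; simp [PySem.Chars.replace.go, pvRep]
  | succ n ih =>
    intro l acc h
    match l with
    | [] => simp [PySem.Chars.replace.go, pvRep]
    | [c] =>
      rw [PySem.Chars.replace.go]
      have hpre : (['-', '-'].isPrefixOf [c]) = false := by
        simp [List.isPrefixOf]
      simp only [hpre, Bool.false_eq_true, if_false]
      rw [ih [] (c :: acc) (by simp)]
      simp [pvRep]
    | a :: b :: t =>
      rw [PySem.Chars.replace.go]
      by_cases hab : a = '-' ∧ b = '-'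
      · obtain ⟨ha, hb⟩ := hab; subst ha; subst hb
        have hpre : (['-', '-'].isPrefixOf ('-' :: '-' :: t)) = true := by
          simp [List.isPrefixOf]
        simp only [hpre, if_true, List.length_cons, List.length_nil, List.drop_succ_cons, List.drop_zero,
          List.reverse_cons, List.reverse_nil, List.nil_append, List.singleton_append]
        rw [ih t ('-' :: acc) (by simp at h; omega)]
        simp [pvRep]
      · have hpre : (['-', '-'].isPrefixOf (a :: b :: t)) = false := by
          simp only [List.isPrefixOf]
          simp only [Bool.and_eq_false_iff]
          by_cases h1 : a = '-'
          · right; left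
            have h2 : ¬ b = '-' := fun h2 => hab ⟨h1, h2⟩
            simp
            intro hx; exact h2 hx.symm
          · left; simp; intro hx; exact h1 hx.symm
        simp only [hpre, Bool.false_eq_true, if_false]
        rw [ih (b :: t) (a :: acc) (by simp at h ⊢; omega)]
        simp only [pvRep, if_neg hab, List.reverse_cons, List.append_assoc, List.singleton_append]

theorem pvReplace_eq (l : List Char) :
    PySem.Chars.replace l ['-', '-'] ['-'] = pvRep l := by
  rw [PySem.Chars.replace]
  simp only [List.isEmpty, reduceCtorEq, if_false]
  simpa using pvRep_go l.length l [] le_rfl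

theorem pvRep_len_le (l : List Char) : (pvRep l).length ≤ l.length := by
  fun_induction pvRep l with
  | case1 => simp
  | case2 c => simp
  | case3 a b t h ih => simp only [List.length_cons] at ih ⊢; omega
  | case4 a b t h ih => simp only [List.length_cons] at ih ⊢; omega

theorem pvRep_len_lt (l : List Char) (h : ['-', '-'] <:+: l) :
    (pvRep l).length < l.length := by
  fun_induction pvRep l with
  | case1 => simp at h
  | case2 c =>
    exfalso
    have := h.length_le
    simp at this
  | case3 a b t hab ih =>
    have := pvRep_len_le t
    simp only [List.length_cons] at *
    omega
  | case4 a b t hab ih =>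
    have h' : ['-', '-'] <:+: (b :: t) := by
      rcases (List.infix_cons_iff).1 h with hp | hi
      · exfalso
        rcases hp with ⟨r, hr⟩
        obtain ⟨ha, hb, -⟩ : '-' = a ∧ '-' = b ∧ r = t := by simpa using hr
        exact hab ⟨ha.symm, hb.symm⟩
      · exact hi
    have := ih h'
    simp only [List.length_cons] at *
    omega

-- A's `while "--" in name: name = name.replace("--", "-")` loop.
def pvCollapse (name : String) : String :=
  if PySem.Str.isIn "--" name then pvCollapse (PySem.Str.replace name "--" "-") else name
termination_by name.toList.length
decreasing_by
  rename_i h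
  rw [PySem.Str.toList_replace]
  show (PySem.Chars.replace name.toList ['-', '-'] ['-']).length < name.toList.length
  rw [pvReplace_eq]
  exact pvRep_len_lt _ ((PySem.Str.isIn_iff_infix _ _).1 h)

def sanitize_k8s_name_py (raw : String) : String :=
  -- sanitized: list[str]; for ch in raw.lower(): append
  let sanitized : List Char := (PySem.Str.lower raw).toList.foldl
    (fun acc ch =>
      if ('a' ≤ ch ∧ ch ≤ 'z') ∨ ('0' ≤ ch ∧ ch ≤ '9') ∨ (ch = '-' ∨ ch = '.')  -- ch in {"-", "."}
      then acc ++ [ch] else acc ++ ['-']) []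
  let name := String.ofList sanitized    -- "".join(sanitized)
  let name := pvCollapse name            -- while "--" in name: …
  PySem.Str.stripChars name "-."         -- name.strip("-.")

-- ===== PORT B =====
def sanitize_k8s_name_py_alt (raw : String) : String :=
  let out : List Char := (PySem.Str.lower raw).toList.foldl
    (fun out ch =>
      let c := if ('a' ≤ ch ∧ ch ≤ 'z') ∨ ('0' ≤ ch ∧ ch ≤ '9')
                  ∨ PySem.Chars.isIn [ch] ['-', '.'] = true   -- ch in "-."
               then ch else '-'
      if c = '-' ∧ out ≠ [] ∧ PySem.List.pyGet? out (-1) = some '-'  -- out and out[-1] == "-" → continue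
      then out else out ++ [c]) []
  PySem.Str.stripChars (String.ofList out) "-."    -- "".join(out).strip("-.")

-- ===== PRECONDITION & SPEC =====
def Spec_sanitize_k8s_name_py (raw : String) (out : String) : Prop := out = sanitize_k8s_name_py_alt raw
instance (raw : String) (out : String) : Decidable (Spec_sanitize_k8s_name_py raw out) := by unfold Spec_sanitize_k8s_name_py; infer_instance

-- ===== CLAIM (what is proved, stated in full; the proofs are below) =====
def Claim_equal_sanitize_k8s_name_py : Prop := ∀ (raw : String), Dom_sanitize_k8s_name_py raw → Spec_sanitize_k8s_name_py raw (sanitize_k8s_name_py raw)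

-- ===== LEMMAS AND PROOFS =====

-- Full collapse of runs of '-' to a single '-': the fixpoint A's while loop reaches.
def pvSq : List Char → List Char
  | [] => []
  | [c] => [c]
  | a :: b :: t => if a = '-' ∧ b = '-' then pvSq (b :: t) else a :: pvSq (b :: t)

-- B's pass, parametrised by "was the last emitted character a '-'?".
def pvSqA : Bool → List Char → List Char
  | _, [] => []
  | b, c :: t => if c = '-' ∧ b = true then pvSqA b t else c :: pvSqA (c = '-') t

theorem pvSq_cons_ne (c : Char) (t : List Char) (h : ¬ c = '-') :
    pvSq (c :: t) = c :: pvSq t := by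
  cases t <;> simp [pvSq, h]

theorem pvSq_dd (x : List Char) : pvSq ('-' :: '-' :: x) = pvSq ('-' :: x) := by
  simp [pvSq]

theorem pvSq_cons₂ (c a : Char) (x : List Char) (h : ¬ (c = '-' ∧ a = '-')) :
    pvSq (c :: a :: x) = c :: pvSq (a :: x) := by
  simp [pvSq, h]

theorem pvSq_dash (t : List Char) :
    pvSq ('-' :: t) = '-' :: pvSq (t.dropWhile (· = '-')) := by
  induction t with
  | nil => rfl
  | cons c u ih =>
    by_cases hc : c = '-'
    · subst hc
      rw [pvSq_dd, ih]
      simp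
    · rw [pvSq_cons₂ '-' c u (by simp [hc]), pvSq_cons_ne c u hc]
      rw [show (c :: u).dropWhile (· = '-') = c :: u by simp [hc]]
      rw [pvSq_cons_ne c u hc]

theorem pvSqA_eq (t : List Char) :
    pvSqA false t = pvSq t ∧ pvSqA true t = pvSq (t.dropWhile (· = '-')) := by
  induction t with
  | nil => constructor <;> rfl
  | cons c u ih =>
    constructor
    · by_cases hc : c = '-'
      · subst hc
        rw [show pvSqA false ('-' :: u) = '-' :: pvSqA true u by simp [pvSqA]]
        rw [ih.2, pvSq_dash]
      · rw [show pvSqA false (c :: u) = c :: pvSqA false u by simp [pvSqA, hc]]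
        rw [ih.1, pvSq_cons_ne c u hc]
    · by_cases hc : c = '-'
      · subst hc
        rw [show pvSqA true ('-' :: u) = pvSqA true u by simp [pvSqA]]
        rw [ih.2]
        simp
      · rw [show pvSqA true (c :: u) = c :: pvSqA false u by simp [pvSqA, hc]]
        rw [show (c :: u).dropWhile (· = '-') = c :: u by simp [hc]]
        rw [ih.1, pvSq_cons_ne c u hc]

theorem pvSq_cons_pvRep (u : List Char) : ∀ (c : Char), pvSq (c :: pvRep u) = pvSq (c :: u) := by
  fun_induction pvRep u with
  | case1 => intro c; rfl
  | case2 d => intro c; rfl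
  | case3 a b t hab ih =>
    intro c
    obtain ⟨ha, hb⟩ := hab; subst ha; subst hb
    by_cases hc : c = '-'
    · subst hc
      simp only [pvSq_dd]
      exact ih '-'
    · rw [pvSq_cons_ne c _ hc, pvSq_cons_ne c _ hc]
      simp only [pvSq_dd]
      rw [ih '-']
  | case4 a b t hab ih =>
    intro c
    by_cases hca : c = '-' ∧ a = '-'
    · obtain ⟨hc, ha⟩ := hca; subst hc; subst ha
      simp only [pvSq_dd]
      exact ih '-'
    · rw [pvSq_cons₂ c a _ hca, pvSq_cons₂ c a _ hca]
      rw [ih a]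

theorem pvSq_pvRep (l : List Char) : pvSq (pvRep l) = pvSq l := by
  match l with
  | [] => rfl
  | [c] => rfl
  | a :: b :: t =>
    by_cases hab : a = '-' ∧ b = '-'
    · obtain ⟨ha, hb⟩ := hab; subst ha; subst hb
      rw [show pvRep ('-' :: '-' :: t) = '-' :: pvRep t by simp [pvRep]]
      rw [pvSq_cons_pvRep t '-', pvSq_dd]
    · rw [show pvRep (a :: b :: t) = a :: pvRep (b :: t) by simp [pvRep, hab]]
      exact pvSq_cons_pvRep (b :: t) a

theorem pvSq_of_no_infix (l : List Char) (h : ¬ (['-', '-'] <:+: l)) : pvSq l = l := by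
  fun_induction pvSq l with
  | case1 => rfl
  | case2 c => rfl
  | case3 a b t hab ih =>
    exfalso
    apply h
    obtain ⟨ha, hb⟩ := hab; subst ha; subst hb
    exact ⟨[], t, rfl⟩
  | case4 a b t hab ih =>
    have h' : ¬ (['-', '-'] <:+: (b :: t)) := by
      rintro ⟨s, t', he⟩
      exact h ⟨a :: s, t', by simpa using congrArg (List.cons a) he⟩
    rw [ih h']

theorem pvCollapse_eq (m : List Char) :
    pvCollapse (String.ofList m) = String.ofList (pvSq m) := by
  induction hn : m.length using Nat.strong_induction_on generalizing m with
  | _ n ih =>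
    rw [pvCollapse]
    by_cases h : PySem.Str.isIn "--" (String.ofList m) = true
    · rw [if_pos h]
      have hinf : ['-', '-'] <:+: m := by
        have := (PySem.Str.isIn_iff_infix _ _).1 h
        simpa using this
      have hrep : PySem.Str.replace (String.ofList m) "--" "-" = String.ofList (pvRep m) := by
        show String.ofList (PySem.Chars.replace (String.ofList m).toList "--".toList "-".toList)
            = String.ofList (pvRep m)
        congr 1
        rw [show (String.ofList m).toList = m from String.toList_ofList]
        rw [show "--".toList = ['-', '-'] by rfl, show "-".toList = ['-'] by rfl]
        exact pvReplace_eq m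
      rw [hrep]
      rw [ih (pvRep m).length (by rw [← hn]; exact pvRep_len_lt m hinf) (pvRep m) rfl]
      rw [pvSq_pvRep]
    · rw [if_neg h]
      have : ¬ (['-', '-'] <:+: m) := by
        intro hi
        apply h
        rw [PySem.Str.isIn_iff_infix]
        simpa using hi
      rw [pvSq_of_no_infix m this]

-- the character mapping shared by the two programs
def pvF (ch : Char) : Char :=
  if ('a' ≤ ch ∧ ch ≤ 'z') ∨ ('0' ≤ ch ∧ ch ≤ '9') ∨ (ch = '-' ∨ ch = '.') then ch else '-'

theorem pvIsIn_pair (c : Char) :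
    (PySem.Chars.isIn [c] ['-', '.'] = true) ↔ (c = '-' ∨ c = '.') := by
  rw [show (PySem.Chars.isIn [c] ['-', '.'] = true) ↔ ([c] <:+: ['-', '.']) by
    have := PySem.Str.isIn_iff_infix (String.ofList [c]) (String.ofList ['-', '.'])
    simpa [PySem.Str.isIn] using this]
  constructor
  · intro ⟨s, t, hst⟩
    have hc : c ∈ ['-', '.'] := by
      rw [← hst]; simp
    simpa using hc
  · rintro (rfl | rfl)
    · exact ⟨[], ['.'], rfl⟩
    · exact ⟨['-'], [], rfl⟩

theorem pvGet_neg_one (l : List Char) : PySem.List.pyGet? l (-1) = l.getLast? := by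
  cases l with
  | nil => rfl
  | cons a t =>
    simp [PySem.List.pyGet?, PySem.List.pyIdx?, List.getLast?_eq_getElem?]

theorem pvFoldA (L : List Char) :
    L.foldl (fun acc ch =>
      if ('a' ≤ ch ∧ ch ≤ 'z') ∨ ('0' ≤ ch ∧ ch ≤ '9') ∨ (ch = '-' ∨ ch = '.')
      then acc ++ [ch] else acc ++ ['-']) [] = L.map pvF := by
  have : (fun (acc : List Char) ch =>
      if ('a' ≤ ch ∧ ch ≤ 'z') ∨ ('0' ≤ ch ∧ ch ≤ '9') ∨ (ch = '-' ∨ ch = '.')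
      then acc ++ [ch] else acc ++ ['-']) = fun acc ch => acc ++ [pvF ch] := by
    funext acc ch
    unfold pvF
    split <;> rfl
  rw [this]
  simpa using PySem.List.foldl_append_singleton_eq_map pvF L []

theorem pvStepB_eq :
    (fun (out : List Char) (ch : Char) =>
      let c := if ('a' ≤ ch ∧ ch ≤ 'z') ∨ ('0' ≤ ch ∧ ch ≤ '9')
                  ∨ PySem.Chars.isIn [ch] ['-', '.'] = true
               then ch else '-'
      if c = '-' ∧ out ≠ [] ∧ PySem.List.pyGet? out (-1) = some '-'
      then out else out ++ [c])
    = fun (out : List Char) (ch : Char) =>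
        if pvF ch = '-' ∧ out ≠ [] ∧ out.getLast? = some '-' then out else out ++ [pvF ch] := by
  funext out ch
  have hcond : (('a' ≤ ch ∧ ch ≤ 'z') ∨ ('0' ≤ ch ∧ ch ≤ '9')
        ∨ PySem.Chars.isIn [ch] ['-', '.'] = true) ↔
      (('a' ≤ ch ∧ ch ≤ 'z') ∨ ('0' ≤ ch ∧ ch ≤ '9') ∨ (ch = '-' ∨ ch = '.')) := by
    constructor
    · rintro (h | h | h)
      · exact Or.inl h
      · exact Or.inr (Or.inl h)
      · exact Or.inr (Or.inr ((pvIsIn_pair ch).1 h))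
    · rintro (h | h | h)
      · exact Or.inl h
      · exact Or.inr (Or.inl h)
      · exact Or.inr (Or.inr ((pvIsIn_pair ch).2 h))
  have hc : (if ('a' ≤ ch ∧ ch ≤ 'z') ∨ ('0' ≤ ch ∧ ch ≤ '9')
                ∨ PySem.Chars.isIn [ch] ['-', '.'] = true
             then ch else '-') = pvF ch := by
    unfold pvF
    rw [if_congr hcond rfl rfl]
  simp only [hc, pvGet_neg_one]

theorem pvFoldB (L : List Char) : ∀ (acc : List Char),
    L.foldl (fun out ch =>
        if pvF ch = '-' ∧ out ≠ [] ∧ out.getLast? = some '-' then out else out ++ [pvF ch]) acc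
    = acc ++ pvSqA (decide (acc.getLast? = some '-')) (L.map pvF) := by
  induction L with
  | nil => intro acc; simp [pvSqA]
  | cons ch t ih =>
    intro acc
    simp only [List.foldl, List.map]
    by_cases h : pvF ch = '-' ∧ acc ≠ [] ∧ acc.getLast? = some '-'
    · rw [if_pos h, ih acc]
      have hb : decide (acc.getLast? = some '-') = true := by simp [h.2.2]
      rw [hb]
      rw [show pvSqA true (pvF ch :: t.map pvF) = pvSqA true (t.map pvF) by
        simp [pvSqA, h.1]]
    · rw [if_neg h, ih (acc ++ [pvF ch])]
      have hlast : (acc ++ [pvF ch]).getLast? = some (pvF ch) := List.getLast?_concat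
      rw [hlast]
      rw [List.append_assoc]
      congr 1
      show [pvF ch] ++ pvSqA (decide (some (pvF ch) = some '-')) (t.map pvF)
          = pvSqA (decide (acc.getLast? = some '-')) (pvF ch :: t.map pvF)
      by_cases hdash : pvF ch = '-'
      · have hacc : decide (acc.getLast? = some '-') = false := by
          rcases Classical.em (acc = []) with h0 | h0
          · simp [h0]
          · have : ¬ acc.getLast? = some '-' := fun hl => h ⟨hdash, h0, hl⟩
            simpa using this
        rw [hacc]
        simp [pvSqA, hdash]
      · rw [show pvSqA (decide (acc.getLast? = some '-')) (pvF ch :: t.map pvF)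
            = pvF ch :: pvSqA (decide (pvF ch = '-')) (t.map pvF) by
          simp [pvSqA, hdash]]
        simp [hdash]

-- ===== VERDICT (by name: the statement is the Claim_ definition above) =====
theorem sanitize_k8s_name_py_spec : Claim_equal_sanitize_k8s_name_py := by
  intro raw _
  unfold Spec_sanitize_k8s_name_py sanitize_k8s_name_py sanitize_k8s_name_py_alt
  simp only []
  rw [pvFoldA, pvStepB_eq, pvFoldB ((PySem.Str.lower raw).toList) []]
  rw [pvCollapse_eq]
  simp only [List.nil_append, List.getLast?_nil]
  simp [(pvSqA_eq (List.map pvF (PySem.Chars.lower raw.toList))).1]
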